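-- pv_equiv track=rewrite | github.com/Conan286/Python_PTIT | PY01039-KIEMTRASODEP.py | soDep
-- ===== SOURCE A (Python) =====
-- def soDep(s):
--     newSet = set()
--     for i in s:
--         newSet.add(i)
--     if len(newSet)!=2: return 0
--     k = abs(ord(s[1])-ord(s[0]))
--     for i in range(2,len(s)):
--         h = abs(ord(s[i])-ord(s[i-1]))
--         if h!=k:
--             return 0
--     return 1
-- ===== SOURCE B (Python) =====
-- def soDep(s):
--     if len(set(s)) != 2:
--         return 0
--     return 1 if len(set(s[::2])) <= 1 and len(set(s[1::2])) <= 1 else 0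
-- ===== Notes on version B (the rewrite author's own statement) =====
-- stated objective: simpler
-- what changed: Replaces the ord-difference loop (all consecutive absolute differences equal) by a parity-partition test: with exactly two distinct characters the condition is equivalent to strict alternation, i.e. s[::2] and s[1::2] are each constant.
import Mathlib
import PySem

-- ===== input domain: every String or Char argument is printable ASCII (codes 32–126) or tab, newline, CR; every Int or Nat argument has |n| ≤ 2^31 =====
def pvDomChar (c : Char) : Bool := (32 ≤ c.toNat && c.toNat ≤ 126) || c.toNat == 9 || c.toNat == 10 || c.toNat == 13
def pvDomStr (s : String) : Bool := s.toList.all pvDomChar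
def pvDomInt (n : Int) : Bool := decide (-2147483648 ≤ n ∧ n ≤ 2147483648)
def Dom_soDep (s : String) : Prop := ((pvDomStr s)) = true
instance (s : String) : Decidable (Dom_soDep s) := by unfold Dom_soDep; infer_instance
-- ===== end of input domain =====

-- B replaces A's ord-difference loop by a parity-partition test (both index-parity slices constant); simpler, same cost.

-- ===== PORT A =====
-- the 'for i in range(2, len(s))' loop: prev = s[i-1], l = s[i:], k fixed
def soDepLoop (prev : Char) (l : List Char) (k : Nat) : Int :=
  match l with
  | [] => 1
  | c :: t =>
      if ((c.toNat : Int) - (prev.toNat : Int)).natAbs ≠ k then 0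
      else soDepLoop c t k

def soDepA (cs : List Char) : Int :=
  let newSet := cs.foldl PySem.Set.add PySem.Set.empty
  if newSet.length ≠ 2 then 0
  else
    match cs with
    | a :: b :: rest => soDepLoop b rest (((b.toNat : Int) - (a.toNat : Int)).natAbs)
    | _ => 0  -- unreachable: a set of size 2 forces len(s) ≥ 2, so s[0], s[1] exist

def soDep (s : String) : Int := soDepA s.toList

-- ===== PORT B =====
-- exact port of the step-2 slice l[::2]
def evens : List Char → List Char
  | [] => []
  | [a] => [a]
  | a :: _ :: t => a :: evens t

def soDepAltB (cs : List Char) : Int :=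
  if (PySem.Set.ofList cs).length ≠ 2 then 0
  else if (PySem.Set.ofList (evens cs)).length ≤ 1 ∧
          (PySem.Set.ofList (evens (cs.drop 1))).length ≤ 1 then 1 else 0

def soDep_alt (s : String) : Int := soDepAltB s.toList

-- ===== PRECONDITION & SPEC =====
def Spec_soDep (s : String) (out : Int) : Prop := out = soDep_alt s
instance (s : String) (out : Int) : Decidable (Spec_soDep s out) := by unfold Spec_soDep; infer_instance

-- ===== CLAIM (what is proved, stated in full; the proofs are below) =====
def Claim_equal_soDep : Prop := ∀ (s : String), Dom_soDep s → Spec_soDep s (soDep s)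

-- ===== LEMMAS AND PROOFS =====

theorem char_eq_of_toNat {a b : Char} (h : a.toNat = b.toNat) : a = b := by
  apply Char.ext
  exact UInt32.toBitVec_inj.mp (BitVec.toNat_injective h)

theorem toNat_ne_of_ne {a b : Char} (h : a ≠ b) : a.toNat ≠ b.toNat :=
  fun hn => h (char_eq_of_toNat hn)

-- alternation predicate: positions 0,2,… of l are x, positions 1,3,… are y
def altAB (x y : Char) : List Char → Bool
  | [] => true
  | c :: t => c == x && altAB y x t

theorem evens_cons (b : Char) (t : List Char) :
    evens (b :: t) = b :: evens (t.drop 1) := by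
  cases t <;> rfl

theorem mem_split (c : Char) : ∀ (l : List Char), c ∈ l →
    c ∈ evens l ∨ c ∈ evens (l.drop 1)
  | [], h => absurd h (by simp)
  | [a], h => by
      rw [List.mem_singleton] at h; subst h
      left; show c ∈ [c]; simp
  | a :: b :: t, h => by
      rcases List.mem_cons.mp h with rfl | h
      · left; show c ∈ c :: evens t; exact List.mem_cons_self
      rcases List.mem_cons.mp h with rfl | h
      · right; show c ∈ evens (c :: t)
        rw [evens_cons]; exact List.mem_cons_self
      rcases mem_split c t h with h1 | h1
      · left; show c ∈ a :: evens t; exact List.mem_cons_of_mem _ h1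
      · right; show c ∈ evens (b :: t)
        rw [evens_cons]; exact List.mem_cons_of_mem _ h1

theorem two_distinct (cs : List Char) (h : (PySem.Set.ofList cs).length = 2) :
    ∃ x y, x ≠ y ∧ (∀ c ∈ cs, c = x ∨ c = y) ∧ x ∈ cs ∧ y ∈ cs := by
  obtain ⟨x, y, hxy⟩ := List.length_eq_two.mp h
  have nd := PySem.Set.nodup_ofList cs
  rw [hxy] at nd
  have hne : x ≠ y := by
    intro he; subst he; simp [List.nodup_cons] at nd
  refine ⟨x, y, hne, ?_, ?_, ?_⟩
  · intro c hc
    have hm : c ∈ PySem.Set.ofList cs := (PySem.Set.mem_ofList cs c).mpr hc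
    rw [hxy] at hm; simpa using hm
  · exact (PySem.Set.mem_ofList cs x).mp (by rw [hxy]; simp)
  · exact (PySem.Set.mem_ofList cs y).mp (by rw [hxy]; simp)

theorem foldl_add_const (a : Char) : ∀ (t : List Char), (∀ c ∈ t, c = a) →
    t.foldl PySem.Set.add [a] = [a]
  | [], _ => rfl
  | c :: t, h => by
      have hc : c = a := h c (by simp)
      subst hc
      have hadd : PySem.Set.add [c] c = [c] := by
        simp [PySem.Set.add, PySem.Set.contains]
      simp only [List.foldl_cons, hadd]
      exact foldl_add_const c t (fun d hd => h d (by simp [hd]))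

theorem setlen_cons_le_one_iff (a : Char) (t : List Char) :
    (PySem.Set.ofList (a :: t)).length ≤ 1 ↔ ∀ c ∈ t, c = a := by
  constructor
  · intro h c hc
    have ha : a ∈ PySem.Set.ofList (a :: t) := (PySem.Set.mem_ofList _ a).mpr (by simp)
    have hcs : c ∈ PySem.Set.ofList (a :: t) := (PySem.Set.mem_ofList _ c).mpr (by simp [hc])
    rcases hu : PySem.Set.ofList (a :: t) with _ | ⟨z, _ | _⟩
    · rw [hu] at ha; simp at ha
    · rw [hu] at ha hcs
      rw [List.mem_singleton] at ha hcs
      exact hcs.trans ha.symm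
    · rw [hu] at h; simp at h
  · intro h
    have he : PySem.Set.ofList (a :: t) = t.foldl PySem.Set.add [a] := by
      rw [PySem.Set.ofList_eq_foldl]; rfl
    rw [he, foldl_add_const a t h]
    simp

theorem altAB_iff : ∀ (rest : List Char) (x y : Char),
    altAB x y rest = true ↔
      (∀ c ∈ evens rest, c = x) ∧ (∀ c ∈ evens (rest.drop 1), c = y)
  | [], x, y => by simp [altAB, evens]
  | [c], x, y => by
      simp [altAB, evens]
  | c :: d :: t, x, y => by
      have ih := altAB_iff t x y
      simp only [altAB, evens, evens_cons, List.drop_succ_cons, List.drop_zero,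
        Bool.and_eq_true, beq_iff_eq, List.mem_cons, ih]
      constructor
      · rintro ⟨hc, hd, h1, h2⟩
        exact ⟨fun e he => he.elim (fun h => h ▸ hc) (h1 e),
               fun e he => he.elim (fun h => h ▸ hd) (h2 e)⟩
      · rintro ⟨h1, h2⟩
        exact ⟨h1 c (Or.inl rfl), h2 d (Or.inl rfl),
               fun e he => h1 e (Or.inr he), fun e he => h2 e (Or.inr he)⟩

theorem loop_eq : ∀ (l : List Char) (a b : Char), a ≠ b →
    (∀ c ∈ l, c = a ∨ c = b) →
    soDepLoop b l (((b.toNat : Int) - (a.toNat : Int)).natAbs) =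
      if altAB a b l then 1 else 0
  | [], a, b, _, _ => by simp [soDepLoop, altAB]
  | c :: t, a, b, hab, hmem => by
      have hne : a.toNat ≠ b.toNat := toNat_ne_of_ne hab
      rcases hmem c (by simp) with hc | hc
      · subst hc
        have hg : ¬(((c.toNat : Int) - (b.toNat : Int)).natAbs ≠
            ((b.toNat : Int) - (c.toNat : Int)).natAbs) := by omega
        have hk2 : ((b.toNat : Int) - (c.toNat : Int)).natAbs =
            ((c.toNat : Int) - (b.toNat : Int)).natAbs := by omega
        have halt : altAB c b (c :: t) = altAB b c t := by simp [altAB]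
        have ih := loop_eq t b c (Ne.symm hab)
          (fun d hd => (hmem d (by simp [hd])).symm)
        simp only [soDepLoop]
        rw [if_neg hg, hk2, halt]
        exact ih
      · subst hc
        have hg : ((c.toNat : Int) - (c.toNat : Int)).natAbs ≠
            ((c.toNat : Int) - (a.toNat : Int)).natAbs := by omega
        have halt : altAB a c (c :: t) = false := by
          simp [altAB]; exact fun h => absurd h.symm hab
        simp only [soDepLoop]
        rw [if_pos hg, halt]
        simp
  termination_by l => l.length

theorem loop_zero_mem : ∀ (l : List Char) (b c : Char), c ∈ l → c ≠ b →
    soDepLoop b l 0 = 0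
  | d :: t, b, c, hc, hne => by
      by_cases hdb : d = b
      · subst hdb
        have h0 : ¬(((d.toNat : Int) - (d.toNat : Int)).natAbs ≠ 0) := by omega
        simp only [soDepLoop]
        rw [if_neg h0]
        have hct : c ∈ t := by
          rcases List.mem_cons.mp hc with rfl | h
          · exact absurd rfl hne
          · exact h
        exact loop_zero_mem t d c hct hne
      · have hg : ((d.toNat : Int) - (b.toNat : Int)).natAbs ≠ 0 := by
          have := toNat_ne_of_ne hdb; omega
        simp only [soDepLoop]
        rw [if_pos hg]

theorem main_eq (cs : List Char) : soDepA cs = soDepAltB cs := by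
  have hfold : cs.foldl PySem.Set.add PySem.Set.empty = PySem.Set.ofList cs := by
    rw [PySem.Set.ofList_eq_foldl]; rfl
  simp only [soDepA, soDepAltB, hfold]
  by_cases h2 : (PySem.Set.ofList cs).length = 2
  · rw [h2]
    rw [if_neg (by simp), if_neg (by simp)]
    obtain ⟨x, y, hxy, hcov, hx, hy⟩ := two_distinct cs h2
    rcases cs with _ | ⟨a, _ | ⟨b, rest⟩⟩
    · simp at hx
    · rw [List.mem_singleton] at hx hy
      exact absurd (hx.trans hy.symm) hxy
    · simp only [List.drop_succ_cons, List.drop_zero]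
      simp only [evens_cons, List.drop_succ_cons, List.drop_zero]
      by_cases hab : a = b
      · -- k = 0; some char of rest differs from a, so both sides give 0
        subst hab
        have hyne : x ≠ a ∨ y ≠ a := by
          by_cases hxa : x = a
          · exact Or.inr (fun hya => hxy (hxa.trans hya.symm))
          · exact Or.inl hxa
        obtain ⟨z, hz, hzr⟩ : ∃ z, z ≠ a ∧ z ∈ rest := by
          rcases hyne with h | h
          · refine ⟨x, h, ?_⟩
            rcases List.mem_cons.mp hx with rfl | hx' <;>
              [exact absurd rfl h;
               rcases List.mem_cons.mp hx' with rfl | hx'' <;>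
                 [exact absurd rfl h; exact hx'']]
          · refine ⟨y, h, ?_⟩
            rcases List.mem_cons.mp hy with rfl | hy' <;>
              [exact absurd rfl h;
               rcases List.mem_cons.mp hy' with rfl | hy'' <;>
                 [exact absurd rfl h; exact hy'']]
        have h0 : ((a.toNat : Int) - (a.toNat : Int)).natAbs = 0 := by omega
        rw [h0, loop_zero_mem rest a z hzr hz]
        rw [if_neg]
        rintro ⟨he, ho⟩
        rw [setlen_cons_le_one_iff] at he ho
        rcases mem_split z rest hzr with hm | hm
        · exact hz (he z hm)
        · exact hz (ho z hm)
      · -- two distinct chars, s[0] ≠ s[1]: both sides test alternation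
        have hcov' : ∀ c ∈ a :: b :: rest, c = a ∨ c = b := by
          intro c hc
          rcases hcov a (by simp) with ha' | ha'
          · rcases hcov b (by simp) with hb' | hb'
            · exact absurd (ha'.trans hb'.symm) hab
            · rcases hcov c hc with h | h
              · exact Or.inl (h.trans ha'.symm)
              · exact Or.inr (h.trans hb'.symm)
          · rcases hcov b (by simp) with hb' | hb'
            · rcases hcov c hc with h | h
              · exact Or.inr (h.trans hb'.symm)
              · exact Or.inl (h.trans ha'.symm)
            · exact absurd (ha'.trans hb'.symm) hab
        have hmem : ∀ c ∈ rest, c = a ∨ c = b :=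
          fun c hc => hcov' c (by simp [hc])
        rw [loop_eq rest a b hab hmem]
        have hcond : ((PySem.Set.ofList (a :: evens rest)).length ≤ 1 ∧
            (PySem.Set.ofList (b :: evens (rest.drop 1))).length ≤ 1) ↔
            altAB a b rest = true := by
          rw [altAB_iff, setlen_cons_le_one_iff, setlen_cons_le_one_iff]
        by_cases hA : altAB a b rest = true
        · rw [if_pos hA, if_pos (hcond.mpr hA)]
        · rw [if_neg hA, if_neg (fun h => hA (hcond.mp h))]
  · rw [if_pos h2, if_pos h2]

-- ===== VERDICT (by name: the statement is the Claim_ definition above) =====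
theorem soDep_spec : Claim_equal_soDep := by
  intro s _
  show soDep s = soDep_alt s
  exact main_eq s.toList
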